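-- pv_equiv track=rewrite | github.com/jworender/cutlass | build/lib/cutlass/preprocessing.py | _organise_by_prefix
-- ===== SOURCE A (Python) =====
-- from typing import Dict, Iterable, List, Mapping, MutableMapping, Optional, Sequence
--
-- def _organise_by_prefix(feature_names: Sequence[str]) -> Dict[str, List[str]]:
--     """
--     Group columns by prefix (characters before the trailing digits).
--
--     This replicates the heuristic used in the experimental scripts to keep
--     longitudinal measurements grouped together.
--     """
--     groups: Dict[str, List[str]] = {}
--     for feat in feature_names:
--         prefix = str(feat)
--         while prefix and prefix[-1].isdigit():
--             prefix = prefix[:-1]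
--         groups.setdefault(prefix, []).append(str(feat))
--     for prefix, flist in groups.items():
--         numeric = [f for f in flist if f[len(prefix):].isdigit()]
--         non_numeric = [f for f in flist if not f[len(prefix):].isdigit()]
--         groups[prefix] = sorted(
--             numeric,
--             key=lambda x: int(x[len(prefix):]) if x[len(prefix):] else 0,
--         ) + non_numeric
--     return groups
-- ===== SOURCE B (Python) =====
-- def _organise_by_prefix(feature_names):
--     """Group columns by prefix (characters before the trailing digits).
--
--     Instead of grouping first and then sorting each group, pre-create the
--     groups dict in first-appearance order, perform ONE global stable sort of
--     all names by their secondary key (numeric suffix value) and then by their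
--     primary key (0 = has a numeric suffix, 1 = plain), and distribute the
--     globally sorted names into their groups in a single pass; the restriction
--     of a stable sort to each group is exactly that group's required order.
--     """
--     pairs = []
--     for feat in feature_names:
--         f = str(feat)
--         pairs.append((f, f.rstrip("0123456789")))
--     groups = {p: [] for _, p in pairs}
--
--     def val(t):
--         s = t[0][len(t[1]):]
--         return int(s) if s else 0
--
--     def cat(t):
--         return 0 if len(t[0]) > len(t[1]) else 1
--
--     for f, p in sorted(sorted(pairs, key=val), key=cat):
--         groups[p].append(f)
--     return groups
-- ===== Notes on version B (the rewrite author's own statement) =====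
-- stated objective: alternative
-- what changed: A builds a dict of per-prefix lists and then, in a second pass over the dict, re-slices each group's names, splits them into numeric/plain and sorts each group separately; B never sorts a group: it pre-creates the empty groups in first-appearance order, performs one GLOBAL stable sort of all names (two stable passes: by numeric suffix value, then by has-suffix category) and distributes the globally sorted names into the groups in a single pass, relying on stability of the global sort restricted to each group.
import Mathlib
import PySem

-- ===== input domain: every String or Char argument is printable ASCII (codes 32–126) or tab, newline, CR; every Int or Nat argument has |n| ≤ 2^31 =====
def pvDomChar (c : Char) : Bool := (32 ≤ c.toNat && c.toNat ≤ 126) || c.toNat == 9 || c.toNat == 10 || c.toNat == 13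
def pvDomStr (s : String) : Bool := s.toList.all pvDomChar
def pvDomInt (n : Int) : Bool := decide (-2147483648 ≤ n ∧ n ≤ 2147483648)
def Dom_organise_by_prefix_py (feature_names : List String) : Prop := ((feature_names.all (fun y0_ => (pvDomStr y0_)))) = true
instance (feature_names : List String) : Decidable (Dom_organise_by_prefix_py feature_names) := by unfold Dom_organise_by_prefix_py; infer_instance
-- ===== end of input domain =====

-- B never sorts a group: it pre-creates the empty groups in first-appearance order, runs ONE
-- global stable sort of all names (two stable passes: by numeric suffix value, then by
-- has-numeric-suffix category) and distributes the sorted names into the groups in a single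
-- pass — A instead groups first and then splits and sorts every group (objective: alternative).

-- ===== PORT A =====

-- A's while loop: `while prefix and prefix[-1].isdigit(): prefix = prefix[:-1]`
def stripA (p : List Char) : List Char :=
  if h : p ≠ [] ∧ ((PySem.List.pyGet? p (-1)).map PySem.Chars.isdigit).getD false = true then
    stripA (PySem.List.slice p none (some (-1)))
  else p
termination_by p.length
decreasing_by
  rw [PySem.List.slice_to_neg_one]
  have : p.length ≠ 0 := by
    intro h0
    exact h.1 (List.eq_nil_of_length_eq_zero h0)
  simp only [List.length_dropLast]
  omega

def organise_by_prefix_py (feature_names : List String) : List (String × List String) :=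
  let groups : PySem.Dict String (List String) :=
    feature_names.foldl
      (fun g feat =>
        -- groups.setdefault(prefix, []).append(str(feat))
        g.modify (String.ofList (stripA feat.toList)) [] (fun l => l ++ [feat]))
      PySem.Dict.empty
  let groups2 : PySem.Dict String (List String) :=
    groups.items.foldl
      (fun g pr =>
        let numeric := pr.2.filter
          (fun f => PySem.Chars.strIsdigit (PySem.List.slice f.toList (some (pr.1.toList.length : Int)) none))
        let non_numeric := pr.2.filter
          (fun f => !PySem.Chars.strIsdigit (PySem.List.slice f.toList (some (pr.1.toList.length : Int)) none))
        g.insert pr.1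
          (PySem.List.sorted numeric
            (fun x =>
              if PySem.List.slice x.toList (some (pr.1.toList.length : Int)) none ≠ []
              then (PySem.Int.ofChars? (PySem.List.slice x.toList (some (pr.1.toList.length : Int)) none)).getD 0
              else 0)
            false
           ++ non_numeric))
      groups
  groups2.items

-- ===== PORT B =====

-- f.rstrip("0123456789"): hand port (PySem has no rstrip-with-chars); exact: drops
-- from the right exactly the characters contained in "0123456789".
def stripB (s : List Char) : List Char :=
  (s.reverse.dropWhile (fun c => ("0123456789".toList).contains c)).reverse

-- Source B's `val(t)`: int(t[0][len(t[1]):]) if that suffix is non-empty else 0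
def valB2 (t : String × String) : Int :=
  let s := PySem.List.slice t.1.toList (some (t.2.toList.length : Int)) none
  if s ≠ [] then (PySem.Int.ofChars? s).getD 0 else 0

-- Source B's `cat(t)`: 0 if len(t[0]) > len(t[1]) else 1
def catB2 (t : String × String) : Int :=
  if t.1.toList.length > t.2.toList.length then 0 else 1

def organise_by_prefix_py_alt (feature_names : List String) : List (String × List String) :=
  let pairs : List (String × String) :=
    feature_names.foldl (fun acc feat => acc ++ [(feat, String.ofList (stripB feat.toList))]) []
  -- groups = {p: [] for _, p in pairs}
  let groups0 : PySem.Dict String (List String) :=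
    pairs.foldl (fun g pr => g.insert pr.2 []) PySem.Dict.empty
  -- sorted(sorted(pairs, key=val), key=cat)
  let sortedPairs := PySem.List.sorted (PySem.List.sorted pairs valB2 false) catB2 false
  -- for f, p in …: groups[p].append(f)
  (sortedPairs.foldl (fun g pr => g.modify pr.2 [] (fun l => l ++ [pr.1])) groups0).items

-- ===== PRECONDITION & SPEC =====
def Spec_organise_by_prefix_py (feature_names : List String) (out : List (String × List String)) : Prop := out = organise_by_prefix_py_alt feature_names
instance (feature_names : List String) (out : List (String × List String)) : Decidable (Spec_organise_by_prefix_py feature_names out) := by unfold Spec_organise_by_prefix_py; infer_instance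

-- ===== CLAIM (what is proved, stated in full; the proofs are below) =====
def Claim_equal_organise_by_prefix_py : Prop := ∀ (feature_names : List String), Dom_organise_by_prefix_py feature_names → Spec_organise_by_prefix_py feature_names (organise_by_prefix_py feature_names)

-- ===== LEMMAS AND PROOFS =====

theorem chr_eq {c d : Char} (h : c.toNat = d.toNat) : c = d := by
  apply Char.ext
  exact UInt32.toNat_inj.mp h

theorem digits_contains (c : Char) :
    (("0123456789".toList).contains c) = PySem.Chars.isdigit c := by
  show ((['0','1','2','3','4','5','6','7','8','9']).contains c) = _
  simp only [PySem.Chars.isdigit, List.contains_eq_mem, List.mem_cons, List.not_mem_nil, or_false]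
  rw [Bool.eq_iff_iff]
  simp only [decide_eq_true_eq, Bool.and_eq_true]
  constructor
  · rintro (h|h|h|h|h|h|h|h|h|h) <;> subst h <;> exact ⟨by decide, by decide⟩
  · rintro ⟨h1, h2⟩
    have h48 : 48 ≤ c.toNat := by exact_mod_cast (h1 : ('0').val ≤ c.val)
    have h57 : c.toNat ≤ 57 := by exact_mod_cast (h2 : c.val ≤ ('9').val)
    interval_cases h : c.toNat <;>
      first
        | exact Or.inl (chr_eq h)
        | exact Or.inr (Or.inl (chr_eq h))
        | exact Or.inr (Or.inr (Or.inl (chr_eq h)))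
        | exact Or.inr (Or.inr (Or.inr (Or.inl (chr_eq h))))
        | exact Or.inr (Or.inr (Or.inr (Or.inr (Or.inl (chr_eq h)))))
        | exact Or.inr (Or.inr (Or.inr (Or.inr (Or.inr (Or.inl (chr_eq h))))))
        | exact Or.inr (Or.inr (Or.inr (Or.inr (Or.inr (Or.inr (Or.inl (chr_eq h)))))))
        | exact Or.inr (Or.inr (Or.inr (Or.inr (Or.inr (Or.inr (Or.inr (Or.inl (chr_eq h))))))))
        | exact Or.inr (Or.inr (Or.inr (Or.inr (Or.inr (Or.inr (Or.inr (Or.inr (Or.inl (chr_eq h)))))))))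
        | exact Or.inr (Or.inr (Or.inr (Or.inr (Or.inr (Or.inr (Or.inr (Or.inr (Or.inr (chr_eq h)))))))))

theorem pyGet_neg_one {α : Type} (p : List α) (h : p ≠ []) :
    PySem.List.pyGet? p (-1) = some (p.getLast h) := by
  rw [PySem.List.pyGet?_neg_one]
  exact List.getLast?_eq_some_getLast h

-- A's character-by-character while loop equals B's rstrip
theorem stripA_eq_stripB (p : List Char) : stripA p = stripB p := by
  fun_induction stripA p with
  | case1 p h ih =>
    rw [ih]
    obtain ⟨hne, hdig⟩ := h
    rw [pyGet_neg_one p hne] at hdig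
    simp only [Option.map_some, Option.getD_some] at hdig
    rw [PySem.List.slice_to_neg_one]
    unfold stripB
    conv_rhs => rw [← List.dropLast_append_getLast hne]
    rw [List.reverse_append]
    simp only [List.reverse_cons, List.reverse_nil, List.nil_append, List.cons_append,
      List.dropWhile_cons]
    rw [digits_contains, hdig]
    simp
  | case2 p h =>
    by_cases hne : p = []
    · subst hne; rfl
    · have hdig : PySem.Chars.isdigit (p.getLast hne) = false := by
        by_contra hcon
        apply h
        refine ⟨hne, ?_⟩
        rw [pyGet_neg_one p hne]
        simp only [Option.map_some, Option.getD_some]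
        simpa using hcon
      unfold stripB
      conv_lhs => rw [← List.dropLast_append_getLast hne]
      conv_rhs => rw [← List.dropLast_append_getLast hne]
      rw [List.reverse_append]
      simp only [List.reverse_cons, List.reverse_nil, List.nil_append, List.cons_append,
        List.dropWhile_cons]
      rw [digits_contains, hdig]
      simp

-- the stripped string is a prefix of the input and the removed tail is all digits
theorem stripA_append (p : List Char) :
    ∃ d, p = stripA p ++ d ∧ ∀ c ∈ d, PySem.Chars.isdigit c = true := by
  fun_induction stripA p with
  | case1 p h ih =>
    obtain ⟨hne, hdig⟩ := h
    rw [pyGet_neg_one p hne] at hdig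
    simp only [Option.map_some, Option.getD_some] at hdig
    rw [PySem.List.slice_to_neg_one] at *
    obtain ⟨d, hd, hall⟩ := ih
    refine ⟨d ++ [p.getLast hne], ?_, ?_⟩
    · conv_lhs => rw [← List.dropLast_append_getLast hne, hd]
      simp
    · intro c hc
      rcases List.mem_append.mp hc with h1 | h1
      · exact hall c h1
      · simp only [List.mem_singleton] at h1; subst h1; exact hdig
  | case2 p h => exact ⟨[], by simp, by simp⟩

-- spec-side abbreviations
def stripS (f : String) : String := String.ofList (stripA f.toList)

def stripSB (f : String) : String := String.ofList (stripB f.toList)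

-- A's per-group transform
def TAfun (p : String) (fl : List String) : List String :=
  PySem.List.sorted
    (fl.filter (fun f => PySem.Chars.strIsdigit (PySem.List.slice f.toList (some (p.toList.length : Int)) none)))
    (fun x =>
      if PySem.List.slice x.toList (some (p.toList.length : Int)) none ≠ []
      then (PySem.Int.ofChars? (PySem.List.slice x.toList (some (p.toList.length : Int)) none)).getD 0
      else 0)
    false
  ++ fl.filter (fun f => !PySem.Chars.strIsdigit (PySem.List.slice f.toList (some (p.toList.length : Int)) none))

theorem stripS_eq (f : String) : stripS f = stripSB f := by
  unfold stripS stripSB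
  rw [stripA_eq_stripB]

def groupsA (fs : List String) : PySem.Dict String (List String) :=
  fs.foldl (fun g feat => g.modify (stripS feat) [] (fun l => l ++ [feat])) PySem.Dict.empty

theorem foldl_pairs (fs : List String) (d : PySem.Dict String (List String)) :
    fs.foldl (fun g feat => g.modify (stripS feat) [] (fun l => l ++ [feat])) d
      = (fs.map (fun f => (stripS f, f))).foldl
          (fun d q => d.modify q.1 [] (fun l => l ++ [q.2])) d := by
  induction fs generalizing d with
  | nil => rfl
  | cons f fs ih => simp only [List.foldl_cons, List.map_cons]; exact ih _

theorem groupsA_items (fs : List String) :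
    (groupsA fs).items
      = (PySem.Set.ofList (fs.map stripS)).map
          (fun p => (p, fs.filter (fun f => stripS f == p))) := by
  have hkeys : (groupsA fs).keys = PySem.Set.ofList (fs.map stripS) := by
    unfold groupsA
    rw [PySem.Dict.keys_foldl_modify_key fs stripS [] (fun _ x l => l ++ [x]) PySem.Dict.empty]
    show PySem.Set.update PySem.Set.empty _ = _
    rw [PySem.Set.update_empty]
  have hnd : (groupsA fs).keys.Nodup := by rw [hkeys]; exact PySem.Set.nodup_ofList _
  have hgetD : ∀ p, (groupsA fs).getD p [] = fs.filter (fun f => stripS f == p) := by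
    intro p
    unfold groupsA
    rw [foldl_pairs]
    rw [PySem.Dict.getD_foldl_modify_append]
    show [] ++ _ = _
    rw [List.nil_append, List.filter_map]
    show List.map _ (List.map _ (fs.filter fun f => stripS f == p)) = _
    rw [List.map_map]
    exact List.map_id'' (fun _ => rfl) _
  rw [PySem.Dict.items_eq_map_keys _ hnd [], hkeys]
  exact List.map_congr_left (fun p _ => by rw [hgetD p])

-- A's second loop: folding `insert` over the dict's own items rewrites each value in place
theorem items_foldl_insert_aux (F : String → List String → List String)
    (todo : List (String × List String)) (doneT : List (String × List String))
    (g : PySem.Dict String (List String))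
    (hg : g.items = doneT ++ todo)
    (hnd : ((doneT ++ todo).map Prod.fst).Nodup) :
    (todo.foldl (fun g pr => g.insert pr.1 (F pr.1 pr.2)) g).items
      = doneT ++ todo.map (fun pr => (pr.1, F pr.1 pr.2)) := by
  induction todo generalizing doneT g with
  | nil => simpa using hg
  | cons kv todo' ih =>
    obtain ⟨k, v⟩ := kv
    have hndsplit := hnd
    rw [List.map_append, List.nodup_append] at hndsplit
    have hknotdone : ∀ q ∈ doneT, (q.1 == k) = false := by
      intro q hq
      simp only [beq_eq_false_iff_ne, ne_eq]
      intro hqk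
      exact hndsplit.2.2 q.1 (List.mem_map_of_mem hq) k (by simp) hqk
    have hknottodo : ∀ q ∈ todo', (q.1 == k) = false := by
      intro q hq
      have h2 := hndsplit.2.1
      simp only [List.map_cons, List.nodup_cons] at h2
      simp only [beq_eq_false_iff_ne, ne_eq]
      intro hqk
      exact h2.1 (hqk ▸ List.mem_map_of_mem hq)
    have hcont : g.contains k = true := by
      simp only [PySem.Dict.contains, hg, List.any_eq_true]
      exact ⟨(k, v), by simp⟩
    have hins : (g.insert k (F k v)).items = (doneT ++ [(k, F k v)]) ++ todo' := by
      simp only [PySem.Dict.insert, hcont, if_pos, hg]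
      rw [List.map_append, List.map_cons]
      rw [(List.map_congr_left (fun q hq => by simp [hknotdone q hq] :
            ∀ q ∈ doneT, (fun p => if (p.1 == k) = true then (k, F k v) else p) q = id q)).trans
          (List.map_id _)]
      rw [(List.map_congr_left (fun q hq => by simp [hknottodo q hq] :
            ∀ q ∈ todo', (fun p => if (p.1 == k) = true then (k, F k v) else p) q = id q)).trans
          (List.map_id _)]
      simp
    rw [List.foldl_cons]
    rw [ih (doneT ++ [(k, F k v)]) (g.insert k (F k v)) hins
      (by
        have hperm : (((doneT ++ [(k, F k v)]) ++ todo').map Prod.fst)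
            = ((doneT ++ (k, v) :: todo').map Prod.fst) := by simp
        rw [hperm]; exact hnd)]
    simp

theorem insertBy_congr {α : Type} (b1 b2 : α → α → Bool) (x : α) (ys : List α)
    (h : ∀ y ∈ ys, b1 x y = b2 x y) :
    PySem.List.insertBy b1 x ys = PySem.List.insertBy b2 x ys := by
  induction ys with
  | nil => rfl
  | cons y ys ih =>
    show (if b1 x y then x :: y :: ys else y :: PySem.List.insertBy b1 x ys)
      = (if b2 x y then x :: y :: ys else y :: PySem.List.insertBy b2 x ys)
    rw [h y (by simp)]
    cases hb : b2 x y with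
    | true => simp
    | false =>
      simp only [Bool.false_eq_true, if_false]
      rw [ih (fun z hz => h z (by simp [hz]))]

theorem sorted_congr_aux {α : Type} (k1 k2 : α → Int) (xs : List α) :
    ∀ (acc : List α), (∀ x ∈ xs, k1 x = k2 x) → (∀ y ∈ acc, k1 y = k2 y) →
    xs.foldl (fun acc x => PySem.List.insertBy (fun a b => decide (k1 a < k1 b)) x acc) acc
      = xs.foldl (fun acc x => PySem.List.insertBy (fun a b => decide (k2 a < k2 b)) x acc) acc := by
  induction xs with
  | nil => intro acc _ _; rfl
  | cons x xs ih =>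
    intro acc hxs hacc
    rw [List.foldl_cons, List.foldl_cons]
    rw [insertBy_congr (fun a b => decide (k1 a < k1 b)) (fun a b => decide (k2 a < k2 b)) x acc
      (fun y hy => by simp only []; rw [hxs x (by simp), hacc y hy])]
    exact ih _ (fun z hz => hxs z (by simp [hz]))
      (fun y hy => by
        rcases (PySem.List.mem_insertBy _ _ _ _).mp hy with h1 | h1
        · rw [h1]; exact hxs x (by simp)
        · exact hacc y h1)

theorem sorted_congr {α : Type} (k1 k2 : α → Int) (xs : List α)
    (h : ∀ x ∈ xs, k1 x = k2 x) :
    PySem.List.sorted xs k1 false = PySem.List.sorted xs k2 false := by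
  rw [PySem.List.sorted_eq_foldl_insertBy, PySem.List.sorted_eq_foldl_insertBy]
  exact sorted_congr_aux k1 k2 xs [] h (by simp)

-- stable-sort naturality: sorting the mapped list is mapping the sorted list
theorem insertBy_map {α β : Type} (g : α → β) (k : β → Int) (x : α) (ys : List α) :
    PySem.List.insertBy (fun a b => decide (k a < k b)) (g x) (ys.map g)
      = (PySem.List.insertBy (fun a b => decide (k (g a) < k (g b))) x ys).map g := by
  induction ys with
  | nil => rfl
  | cons y ys ih =>
    show (if decide (k (g x) < k (g y)) then g x :: g y :: ys.map g
          else g y :: PySem.List.insertBy (fun a b => decide (k a < k b)) (g x) (ys.map g))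
      = ((if decide (k (g x) < k (g y)) then x :: y :: ys
          else y :: PySem.List.insertBy (fun a b => decide (k (g a) < k (g b))) x ys)).map g
    cases hb : decide (k (g x) < k (g y)) with
    | true => simp
    | false =>
      simp only [Bool.false_eq_true, if_false, List.map_cons]
      rw [ih]

theorem sorted_map_aux {α β : Type} (g : α → β) (k : β → Int) (xs : List α) :
    ∀ (acc : List α),
    (xs.map g).foldl (fun acc x => PySem.List.insertBy (fun a b => decide (k a < k b)) x acc) (acc.map g)
      = (xs.foldl (fun acc x => PySem.List.insertBy (fun a b => decide (k (g a) < k (g b))) x acc) acc).map g := by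
  induction xs with
  | nil => intro acc; rfl
  | cons x xs ih =>
    intro acc
    rw [List.map_cons, List.foldl_cons, List.foldl_cons]
    rw [insertBy_map g k x acc]
    exact ih _

theorem sorted_map {α β : Type} (g : α → β) (k : β → Int) (xs : List α) :
    PySem.List.sorted (xs.map g) k false
      = (PySem.List.sorted xs (fun x => k (g x)) false).map g := by
  rw [PySem.List.sorted_eq_foldl_insertBy, PySem.List.sorted_eq_foldl_insertBy]
  exact sorted_map_aux g k xs []

-- inserting ahead of everything
theorem insertBy_eq_cons_of_forall {α : Type} (b : α → α → Bool) (x : α) (s : List α)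
    (h : ∀ z ∈ s, b x z = true) :
    PySem.List.insertBy b x s = x :: s := by
  cases s with
  | nil => rfl
  | cons y t =>
    show (if b x y then x :: y :: t else y :: PySem.List.insertBy b x t) = _
    rw [h y (by simp)]
    simp

theorem insertBy_append_left {α : Type} (b : α → α → Bool) (x : α) (A B : List α)
    (h : ∀ a ∈ A, b x a = false) :
    PySem.List.insertBy b x (A ++ B) = A ++ PySem.List.insertBy b x B := by
  induction A with
  | nil => simp
  | cons a A ih =>
    show (if b x a then x :: a :: (A ++ B) else a :: PySem.List.insertBy b x (A ++ B)) = _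
    rw [h a (by simp)]
    simp only [Bool.false_eq_true, if_false, List.cons_append]
    rw [ih (fun z hz => h z (by simp [hz]))]

-- stable sort with a {0,1}-valued key is the stable partition
theorem sorted_binary_split {α : Type} (key : α → Int) (l : List α)
    (h : ∀ x ∈ l, key x = 0 ∨ key x = 1) :
    PySem.List.sorted l key false
      = l.filter (fun x => key x == 0) ++ l.filter (fun x => !(key x == 0)) := by
  induction l using List.reverseRecOn with
  | nil => rfl
  | append_singleton l x ih =>
    have hl : ∀ y ∈ l, key y = 0 ∨ key y = 1 := fun y hy => h y (by simp [hy])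
    rw [PySem.List.sorted_eq_foldl_insertBy, List.foldl_append, List.foldl_cons, List.foldl_nil,
      ← PySem.List.sorted_eq_foldl_insertBy, ih hl]
    rcases h x (by simp) with hx | hx
    · rw [insertBy_append_left _ x _ _
        (fun a ha => by
          have := List.of_mem_filter ha
          simp only [beq_iff_eq] at this
          simp [hx, this])]
      rw [insertBy_eq_cons_of_forall _ x _
        (fun z hz => by
          have h1 := List.of_mem_filter hz
          rcases hl z (List.mem_of_mem_filter hz) with h0 | h0
          · simp [h0] at h1
          · simp [hx, h0])]
      simp [List.filter_append, hx]
    · rw [PySem.List.insertBy_of_forall_not_before _ x _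
        (fun y hy => by
          rcases List.mem_append.mp hy with h1 | h1 <;>
            rcases hl y (List.mem_of_mem_filter h1) with h0 | h0 <;> simp [hx, h0])]
      simp [List.filter_append, hx, List.append_assoc]

-- filtering commutes with a stable insertion into a sorted list
theorem filter_insertBy {α : Type} (key : α → Int) (q : α → Bool) (x : α) (s : List α)
    (hs : s.Pairwise (fun a b => key a ≤ key b)) :
    (PySem.List.insertBy (fun a b => decide (key a < key b)) x s).filter q
      = if q x then PySem.List.insertBy (fun a b => decide (key a < key b)) x (s.filter q)
        else s.filter q := by
  induction s with
  | nil =>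
    show (List.filter q [x]) = _
    cases hqx : q x <;> simp [PySem.List.insertBy, List.filter, hqx]
  | cons y t ih =>
    rw [List.pairwise_cons] at hs
    obtain ⟨hy, ht⟩ := hs
    show (List.filter q (if decide (key x < key y) then x :: y :: t
        else y :: PySem.List.insertBy (fun a b => decide (key a < key b)) x t)) = _
    cases hlt : decide (key x < key y) with
    | true =>
      simp only [if_pos]
      have hlt' : key x < key y := of_decide_eq_true hlt
      cases hqx : q x with
      | false =>
        simp [hqx]
      | true =>
        simp only [if_pos]
        rw [List.filter_cons_of_pos hqx]
        rw [insertBy_eq_cons_of_forall _ x (List.filter q (y :: t))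
          (fun z hz => by
            have hz' : z ∈ y :: t := List.mem_of_mem_filter hz
            rcases List.mem_cons.mp hz' with h1 | h1
            · subst h1; simpa using hlt'
            · have := hy z h1
              simp only [decide_eq_true_eq]
              omega)]
    | false =>
      simp only [Bool.false_eq_true, if_false]
      rw [List.filter_cons]
      cases hqy : q y with
      | true =>
        simp only [if_pos]
        rw [ih ht]
        cases hqx : q x with
        | true =>
          simp only [if_pos, List.filter_cons, hqy]
          show _ = (if decide (key x < key y) then x :: y :: t.filter q
              else y :: PySem.List.insertBy (fun a b => decide (key a < key b)) x (t.filter q))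
          rw [hlt]
          simp
        | false =>
          simp [hqy]
      | false =>
        simp only [Bool.false_eq_true, if_false]
        rw [ih ht]
        simp [hqy]

theorem filter_sorted {α : Type} (key : α → Int) (q : α → Bool) (xs : List α) :
    (PySem.List.sorted xs key false).filter q = PySem.List.sorted (xs.filter q) key false := by
  induction xs using List.reverseRecOn with
  | nil => rfl
  | append_singleton l x ih =>
    rw [PySem.List.sorted_eq_foldl_insertBy, List.foldl_append, List.foldl_cons, List.foldl_nil,
      ← PySem.List.sorted_eq_foldl_insertBy]
    rw [filter_insertBy key q x _ (PySem.List.sorted_pairwise l key), ih]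
    rw [List.filter_append]
    cases hqx : q x with
    | true =>
      simp only [List.filter_cons, hqx, if_pos, List.filter_nil]
      rw [PySem.List.sorted_eq_foldl_insertBy (l.filter q ++ [x]), List.foldl_append,
        List.foldl_cons, List.foldl_nil, ← PySem.List.sorted_eq_foldl_insertBy]
    | false =>
      simp [hqx]

-- the first dict-comprehension pass: every value is []
theorem getD_groups0 (l : List (String × String)) :
    ∀ (d : PySem.Dict String (List String)) (p : String), d.getD p [] = [] →
    (l.foldl (fun g pr => g.insert pr.2 ([] : List String)) d).getD p [] = [] := by
  induction l with
  | nil => intro d p h; exact h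
  | cons a l ih =>
    intro d p h
    rw [List.foldl_cons]
    apply ih
    rw [PySem.Dict.getD_insert]
    split_ifs <;> simp [h]

-- B's distribution pass, per key
theorem getD_distribute (sp : List (String × String)) (d : PySem.Dict String (List String)) (p : String) :
    (sp.foldl (fun g pr => g.modify pr.2 [] (fun l => l ++ [pr.1])) d).getD p []
      = d.getD p [] ++ (sp.filter (fun pr => pr.2 == p)).map Prod.fst := by
  have h1 : sp.foldl (fun g pr => g.modify pr.2 [] (fun l => l ++ [pr.1])) d
      = (sp.map Prod.swap).foldl (fun g q => g.modify q.1 [] (fun l => l ++ [q.2])) d := by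
    rw [List.foldl_map]
    rfl
  rw [h1, PySem.Dict.getD_foldl_modify_append]
  congr 1
  rw [List.filter_map]
  show List.map _ (List.map Prod.swap (sp.filter _)) = _
  rw [List.map_map]
  rfl

-- the per-group equality: the globally sorted pairs of one group, projected, are A's group value
theorem groupB_eq (p : String) (fl : List String) (hall : ∀ f ∈ fl, stripSB f = p) :
    ((PySem.List.sorted (PySem.List.sorted (fl.map (fun f => (f, stripSB f))) valB2 false) catB2 false).map Prod.fst)
      = TAfun p fl := by
  have hdec : ∀ f ∈ fl, ∃ d, f.toList = p.toList ++ d ∧ (∀ c ∈ d, PySem.Chars.isdigit c = true)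
      ∧ PySem.List.slice f.toList (some (p.toList.length : Int)) none = d := by
    intro f hf
    obtain ⟨d, hd, hdig⟩ := stripA_append f.toList
    have hsp : stripA f.toList = p.toList := by
      have := congrArg String.toList ((stripS_eq f) ▸ hall f hf : stripS f = p)
      simpa [stripS] using this
    rw [hsp] at hd
    refine ⟨d, hd, hdig, ?_⟩
    rw [PySem.List.slice_from_natCast, hd, List.drop_left]
  set gp := fl.map (fun f => (f, stripSB f)) with hgp
  have h01 : ∀ t ∈ gp, catB2 t = 0 ∨ catB2 t = 1 := by
    intro t _
    unfold catB2
    split_ifs <;> simp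
  rw [sorted_binary_split catB2 _ (fun t ht => h01 t ((PySem.List.sorted_perm _ _ _).mem_iff.mp ht))]
  rw [filter_sorted, filter_sorted]
  -- the plain part: constant sort key, so sorting is the identity
  have hplain_key : ∀ t ∈ gp.filter (fun t => !(catB2 t == 0)), valB2 t = 0 := by
    intro t ht
    have htm := List.mem_of_mem_filter ht
    have htf := List.of_mem_filter ht
    obtain ⟨f, hf, hft⟩ := List.mem_map.mp htm
    subst hft
    have hcat : ¬ (f.toList.length > (stripSB f).toList.length) := by
      intro hgt
      have h0 : catB2 (f, stripSB f) = 0 := by unfold catB2; rw [if_pos hgt]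
      rw [h0] at htf
      simp at htf
    obtain ⟨d, hd, _, hslice⟩ := hdec f hf
    have hp := hall f hf
    have hlen : (stripSB f).toList.length = p.toList.length := by rw [hp]
    have hdnil : d = [] := by
      have : f.toList.length = p.toList.length + d.length := by rw [hd]; simp
      rcases List.eq_nil_or_concat d with h0 | ⟨_, _, h0⟩
      · exact h0
      · exfalso; apply hcat; rw [hlen]; subst h0; simp at this ⊢; omega
    unfold valB2
    rw [hp, hslice, hdnil]
    simp
  have hplain : PySem.List.sorted (gp.filter (fun t => !(catB2 t == 0))) valB2 false
      = gp.filter (fun t => !(catB2 t == 0)) := by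
    apply PySem.List.sorted_eq_self_of_pairwise
    apply List.pairwise_of_forall_mem_list
    intro a ha b hb
    rw [hplain_key a ha, hplain_key b hb]
  rw [hplain, List.map_append]
  -- both filters, seen on the underlying strings
  have hnum : ∀ f ∈ fl,
      (catB2 (f, stripSB f) == 0)
        = PySem.Chars.strIsdigit (PySem.List.slice f.toList (some (p.toList.length : Int)) none) := by
    intro f hf
    obtain ⟨d, hd, hdig, hslice⟩ := hdec f hf
    have hp := hall f hf
    have hlen : (stripSB f).toList.length = p.toList.length := by rw [hp]
    rw [hslice]
    cases d with
    | nil =>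
      have hle : ¬ (f.toList.length > (stripSB f).toList.length) := by
        rw [hlen, hd]; simp
      have h1 : catB2 (f, stripSB f) = 1 := by
        unfold catB2; rw [if_neg hle]
      simp [h1, PySem.Chars.strIsdigit]
    | cons c cs =>
      have hgt : f.toList.length > (stripSB f).toList.length := by
        rw [hlen, hd]; simp
      have h1 : catB2 (f, stripSB f) = 0 := by
        unfold catB2; rw [if_pos hgt]
      simp only [h1, PySem.Chars.strIsdigit]
      rw [List.all_eq_true.mpr hdig]
      simp
  unfold TAfun
  congr 1
  · -- numeric part
    rw [hgp, List.filter_map]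
    have hfe : fl.filter ((fun t => catB2 t == 0) ∘ (fun f => (f, stripSB f)))
        = fl.filter (fun f => PySem.Chars.strIsdigit (PySem.List.slice f.toList (some (p.toList.length : Int)) none)) :=
      List.filter_congr (fun f hf => hnum f hf)
    rw [hfe, sorted_map, List.map_map]
    rw [show (Prod.fst ∘ fun f => (f, stripSB f)) = id from rfl, List.map_id]
    apply sorted_congr
    intro f hf
    have hfm := List.mem_of_mem_filter hf
    obtain ⟨d, hd, hdig, hslice⟩ := hdec f hfm
    have hp := hall f hfm
    show valB2 (f, stripSB f) = _
    unfold valB2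
    rw [hp, hslice]
  · -- plain part
    rw [hgp, List.filter_map, List.map_map]
    have hfe : fl.filter ((fun t => !(catB2 t == 0)) ∘ (fun f => (f, stripSB f)))
        = fl.filter (fun f => !PySem.Chars.strIsdigit (PySem.List.slice f.toList (some (p.toList.length : Int)) none)) :=
      List.filter_congr (fun f hf => by
        show (!(catB2 (f, stripSB f) == 0)) = _
        rw [hnum f hf])
    rw [hfe]
    exact List.map_id'' (fun _ => rfl) _

-- A computes the canonical grouped list
theorem A_eq (fs : List String) :
    organise_by_prefix_py fs
      = (PySem.Set.ofList (fs.map stripS)).map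
          (fun p => (p, TAfun p (fs.filter (fun f => stripS f == p)))) := by
  have h0 : organise_by_prefix_py fs
      = ((groupsA fs).items.foldl (fun g pr => g.insert pr.1 (TAfun pr.1 pr.2)) (groupsA fs)).items := rfl
  rw [h0]
  have hnd : ((([] : List (String × List String)) ++ (groupsA fs).items).map Prod.fst).Nodup := by
    rw [List.nil_append, groupsA_items, List.map_map]
    show ((PySem.Set.ofList (fs.map stripS)).map (fun p => p)).Nodup
    rw [List.map_id']
    exact PySem.Set.nodup_ofList _
  rw [items_foldl_insert_aux TAfun (groupsA fs).items [] (groupsA fs) (List.nil_append _).symm hnd]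
  rw [List.nil_append, groupsA_items, List.map_map]
  rfl

-- B computes the same canonical grouped list
set_option maxHeartbeats 1000000 in
theorem B_eq (fs : List String) :
    organise_by_prefix_py_alt fs
      = (PySem.Set.ofList (fs.map stripSB)).map
          (fun p => (p, TAfun p (fs.filter (fun f => stripSB f == p)))) := by
  have hpairs : fs.foldl (fun acc feat => acc ++ [(feat, String.ofList (stripB feat.toList))])
        ([] : List (String × String))
      = fs.map (fun f => (f, stripSB f)) := by
    rw [PySem.List.foldl_append_singleton_eq_map
      (fun feat => (feat, String.ofList (stripB feat.toList))) fs []]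
    rfl
  have h0 : organise_by_prefix_py_alt fs
      = ((PySem.List.sorted
            (PySem.List.sorted (fs.map (fun f => (f, stripSB f))) valB2 false) catB2 false).foldl
          (fun g pr => g.modify pr.2 [] (fun l => l ++ [pr.1]))
          ((fs.map (fun f => (f, stripSB f))).foldl
            (fun g pr => g.insert pr.2 []) PySem.Dict.empty)).items := by
    rw [show organise_by_prefix_py_alt fs
        = ((PySem.List.sorted
              (PySem.List.sorted
                (fs.foldl (fun acc feat => acc ++ [(feat, String.ofList (stripB feat.toList))]) [])
                valB2 false) catB2 false).foldl
            (fun g pr => g.modify pr.2 [] (fun l => l ++ [pr.1]))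
            ((fs.foldl (fun acc feat => acc ++ [(feat, String.ofList (stripB feat.toList))]) []).foldl
              (fun g pr => g.insert pr.2 []) PySem.Dict.empty)).items from rfl]
    rw [hpairs]
  rw [h0]
  set pairs := fs.map (fun f => (f, stripSB f)) with hpr
  set groups0 : PySem.Dict String (List String) :=
    pairs.foldl (fun g pr => g.insert pr.2 []) PySem.Dict.empty with hg0
  set sp := PySem.List.sorted (PySem.List.sorted pairs valB2 false) catB2 false with hsp
  set G := sp.foldl (fun g pr => g.modify pr.2 [] (fun l => l ++ [pr.1])) groups0 with hG
  -- keys of groups0 and of G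
  have hkeys0 : groups0.keys = PySem.Set.ofList (pairs.map Prod.snd) := by
    rw [hg0]
    have : pairs.foldl (fun g pr => g.insert pr.2 ([] : List String)) PySem.Dict.empty
        = pairs.foldl (fun g pr => g.insert pr.2 ((fun (_ : PySem.Dict String (List String)) (_ : String × String) => ([] : List String)) g pr)) PySem.Dict.empty := rfl
    rw [this, PySem.Dict.keys_foldl_insert_key]
    show PySem.Set.update PySem.Set.empty _ = _
    rw [PySem.Set.update_empty]
  have hspmem : ∀ x ∈ sp, x ∈ pairs := by
    intro x hx
    exact (PySem.List.sorted_perm pairs valB2 false).mem_iff.mp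
      ((PySem.List.sorted_perm _ catB2 false).mem_iff.mp hx)
  have hkeysG : G.keys = PySem.Set.ofList (pairs.map Prod.snd) := by
    rw [hG]
    have : sp.foldl (fun g pr => g.modify pr.2 [] (fun l => l ++ [pr.1])) groups0
        = sp.foldl (fun g pr => g.modify pr.2 [] ((fun (_ : PySem.Dict String (List String)) (x : String × String) (l : List String) => l ++ [x.1]) g pr)) groups0 := rfl
    rw [this, PySem.Dict.keys_foldl_modify_key, hkeys0]
    rw [PySem.Set.update_eq_append_filter]
    have hnil : List.filter (fun y => !(PySem.Set.ofList (pairs.map Prod.snd)).contains y)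
        (PySem.Set.ofList (sp.map Prod.snd)) = [] := by
      rw [List.filter_eq_nil_iff]
      intro a ha
      have ham : a ∈ sp.map Prod.snd := (PySem.Set.mem_ofList _ _).mp ha
      obtain ⟨x, hx, hxa⟩ := List.mem_map.mp ham
      have hmem : a ∈ pairs.map Prod.snd := hxa ▸ List.mem_map_of_mem (hspmem x hx)
      have hcont : (PySem.Set.ofList (pairs.map Prod.snd)).contains a = true :=
        (PySem.Set.contains_iff _ _).mpr ((PySem.Set.mem_ofList _ _).mpr hmem)
      simp only [hcont, Bool.not_true]
      simp
    rw [hnil, List.append_nil]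
  have hndG : G.keys.Nodup := by
    rw [hkeysG]; exact PySem.Set.nodup_ofList _
  rw [PySem.Dict.items_eq_map_keys G hndG [], hkeysG]
  have hmapsnd : pairs.map Prod.snd = fs.map stripSB := by
    rw [hpr, List.map_map]; rfl
  rw [hmapsnd]
  apply List.map_congr_left
  intro p hp
  refine congrArg (fun l => (p, l)) ?_
  -- G.getD p [] computed
  have hget0 : groups0.getD p [] = [] := by
    rw [hg0]
    exact getD_groups0 pairs PySem.Dict.empty p (PySem.Dict.getD_empty ..)
  rw [hG, getD_distribute, hget0, List.nil_append]
  -- filter the globally sorted list down to group p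
  have hq1 : sp.filter (fun pr => pr.2 == p)
      = PySem.List.sorted (PySem.List.sorted (pairs.filter (fun pr => pr.2 == p)) valB2 false) catB2 false := by
    rw [hsp, filter_sorted, filter_sorted]
  rw [hq1]
  have hq2 : pairs.filter (fun pr => pr.2 == p)
      = (fs.filter (fun f => stripSB f == p)).map (fun f => (f, stripSB f)) := by
    rw [hpr, List.filter_map]
    rfl
  rw [hq2]
  have hall : ∀ f ∈ fs.filter (fun f => stripSB f == p), stripSB f = p := by
    intro f hf
    exact eq_of_beq (List.mem_filter.mp hf).2
  have hgB := groupB_eq p (fs.filter (fun f => stripSB f == p)) hall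
  -- massage: the group's pair list uses stripSB f; rewrite its second components to p
  exact hgB

-- ===== VERDICT (by name: the statement is the Claim_ definition above) =====
theorem organise_by_prefix_py_spec : Claim_equal_organise_by_prefix_py := by
  intro fs _
  show organise_by_prefix_py fs = organise_by_prefix_py_alt fs
  rw [A_eq, B_eq]
  have hstrip : fs.map stripS = fs.map stripSB := List.map_congr_left (fun f _ => stripS_eq f)
  rw [← hstrip]
  apply List.map_congr_left
  intro p _
  have hfil : fs.filter (fun f => stripS f == p) = fs.filter (fun g => stripSB g == p) :=
    List.filter_congr (fun f _ => by rw [stripS_eq])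
  rw [hfil]
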